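-- pv_equiv track=rewrite | github.com/chrisxiaoyu/contests | Codeforces/522/a.py | solve
-- ===== SOURCE A (Python) =====
-- from typing import List
--
-- def solve(n: int, repost_chain: List[List[str]]) -> int:
--     graph = {'polycarp': 1}
--     max_height = 0
--     for repost in repost_chain:
--         reposter, op = repost[0], repost[-1]
--         height = graph[op.lower()] + 1
--         graph[reposter.lower()] = height
--         max_height = max(height, max_height)
--     return max_height
-- ===== SOURCE B (Python) =====
-- from typing import List
--
-- def solve(n: int, repost_chain: List[List[str]]) -> int:
--     # Pass 1: build the repost tree as parent pointers (index of the repost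
--     # that was reposted; -1 = the root 'polycarp').
--     last = {'polycarp': -1}
--     parent = []
--     for i, repost in enumerate(repost_chain):
--         parent.append(last[repost[-1].lower()])
--         last[repost[0].lower()] = i
--     # Pass 2: traverse the parent structure computing each node's depth
--     # (a child of the root has depth 2, since the root itself has depth 1).
--     depth = []
--     best = 0
--     for p in parent:
--         d = 2 if p == -1 else depth[p] + 1
--         depth.append(d)
--         best = max(best, d)
--     return best
-- ===== Notes on version B (the rewrite author's own statement) =====
-- stated objective: alternative
-- what changed: B first builds the repost tree as a parent-pointer structure (name -> latest defining index), then computes each node's depth by a separate traversal of that structure, instead of A's single pass that accumulates heights and the running max in one dict.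
import Mathlib
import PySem

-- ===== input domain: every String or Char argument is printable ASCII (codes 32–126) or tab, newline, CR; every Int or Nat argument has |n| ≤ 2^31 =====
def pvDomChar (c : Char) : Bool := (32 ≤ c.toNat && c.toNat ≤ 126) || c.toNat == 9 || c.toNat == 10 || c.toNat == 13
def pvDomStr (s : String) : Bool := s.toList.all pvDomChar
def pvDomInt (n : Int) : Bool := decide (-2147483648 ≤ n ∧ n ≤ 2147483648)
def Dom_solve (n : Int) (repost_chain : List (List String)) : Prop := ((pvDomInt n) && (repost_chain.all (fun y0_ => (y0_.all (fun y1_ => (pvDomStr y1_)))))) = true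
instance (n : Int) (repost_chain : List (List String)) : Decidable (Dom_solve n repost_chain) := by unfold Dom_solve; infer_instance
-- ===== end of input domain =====

-- B builds the repost tree as parent pointers first and computes depths by a
-- separate traversal of that structure, instead of A's single accumulating pass
-- (objective: alternative decomposition, same cost).

-- ===== PORT A =====
-- loop body of A's single pass: state = (graph, max_height)
def stepA (st : PySem.Dict String Int × Int) (repost : List String) : PySem.Dict String Int × Int :=
  let reposter := (PySem.List.pyGet? repost 0).getD ""          -- repost[0]; IndexError excluded by Pre_
  let op := (PySem.List.pyGet? repost (-1)).getD ""             -- repost[-1]; IndexError excluded by Pre_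
  let height := (st.1.get? (PySem.Str.lower op)).getD 0 + 1     -- graph[op.lower()]; KeyError excluded by Pre_
  (st.1.insert (PySem.Str.lower reposter) height, max height st.2)

def solve (n : Int) (repost_chain : List (List String)) : Int :=
  (repost_chain.foldl stepA ((PySem.Dict.empty : PySem.Dict String Int).insert "polycarp" 1, 0)).2

-- ===== PORT B =====
-- pass 1 of B: state = (last, parent, i)
def stepB1 (st : PySem.Dict String Int × List Int × Int) (repost : List String) :
    PySem.Dict String Int × List Int × Int :=
  let p := (st.1.get? (PySem.Str.lower ((PySem.List.pyGet? repost (-1)).getD ""))).getD (-1)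
      -- last[repost[-1].lower()]; KeyError excluded by Pre_
  (st.1.insert (PySem.Str.lower ((PySem.List.pyGet? repost 0).getD "")) st.2.2,
   st.2.1 ++ [p], st.2.2 + 1)

-- pass 2 of B: state = (depth, best)
def stepB2 (st : List Int × Int) (p : Int) : List Int × Int :=
  let d := if p = -1 then 2 else (PySem.List.pyGet? st.1 p).getD 0 + 1   -- depth[p]; p is a valid index by construction
  (st.1 ++ [d], max st.2 d)

def solve_alt (n : Int) (repost_chain : List (List String)) : Int :=
  let st1 := repost_chain.foldl stepB1
    ((PySem.Dict.empty : PySem.Dict String Int).insert "polycarp" (-1), ([], 0))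
  let st2 := st1.2.1.foldl stepB2 ([], 0)
  st2.2

-- ===== PRECONDITION & SPEC =====
-- the lowered last element (the one reposted from) and first element (the reposter) of a line
def rcOp (r : List String) : String := PySem.Str.lower (r.getLast?.getD "")
def rcHead (r : List String) : String := PySem.Str.lower (r.head?.getD "")

-- Pre_ excludes exactly the inputs on which A raises: an empty inner list (IndexError)
-- or a line reposting from a name never defined before it (KeyError); B raises there too.
def Pre_solve (n : Int) (repost_chain : List (List String)) : Prop :=
  ∀ i < repost_chain.length,
    repost_chain.getD i [] ≠ [] ∧
    (rcOp (repost_chain.getD i []) = "polycarp" ∨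
      ∃ j < i, rcHead (repost_chain.getD j []) = rcOp (repost_chain.getD i []))

instance (n : Int) (repost_chain : List (List String)) : Decidable (Pre_solve n repost_chain) := by
  unfold Pre_solve; infer_instance

def pvWitness_solve : Int × List (List String) := (2, [["a", "polycarp"], ["b", "a"]])

def Spec_solve (n : Int) (repost_chain : List (List String)) (out : Int) : Prop := out = solve_alt n repost_chain
instance (n : Int) (repost_chain : List (List String)) (out : Int) : Decidable (Spec_solve n repost_chain out) := by unfold Spec_solve; infer_instance

-- ===== CLAIM (what is proved, stated in full; the proofs are below) =====
def Claim_equal_solve : Prop := ∀ (n : Int) (repost_chain : List (List String)), Dom_solve n repost_chain → Pre_solve n repost_chain → Spec_solve n repost_chain (solve n repost_chain)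

-- ===== LEMMAS AND PROOFS =====

-- value A's graph stores for a node B's last stores as index i (-1 = root): root height 1, else depth[i]
def valOf (D : List Int) (i : Int) : Int :=
  if i = -1 then 1 else (PySem.List.pyGet? D i).getD 0

-- "every line's op is already defined": recursion over the lines with the set of defined names
def OkFrom : List (List String) → List String → Prop
  | [], _ => True
  | r :: rs, ks => r ≠ [] ∧ rcOp r ∈ ks ∧ OkFrom rs (rcHead r :: ks)

lemma okFrom_mono : ∀ (rc : List (List String)) (ks ks' : List String),
    (∀ s ∈ ks, s ∈ ks') → OkFrom rc ks → OkFrom rc ks' := by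
  intro rc
  induction rc with
  | nil => intro _ _ _ _; trivial
  | cons r rs ih =>
    intro ks ks' hsub h
    obtain ⟨h1, h2, h3⟩ := h
    refine ⟨h1, hsub _ h2, ih _ _ ?_ h3⟩
    intro s hs
    rcases List.mem_cons.mp hs with h | h
    · exact h ▸ List.mem_cons_self
    · exact List.mem_cons_of_mem _ (hsub _ h)

lemma pre_to_ok : ∀ (rc : List (List String)) (ks : List String), "polycarp" ∈ ks →
    (∀ i < rc.length, rc.getD i [] ≠ [] ∧
      (rcOp (rc.getD i []) = "polycarp" ∨ rcOp (rc.getD i []) ∈ ks ∨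
        ∃ j < i, rcHead (rc.getD j []) = rcOp (rc.getD i []))) →
    OkFrom rc ks := by
  intro rc
  induction rc with
  | nil => intro _ _ _; trivial
  | cons r rs ih =>
    intro ks hp h
    have h0 := h 0 (by simp)
    refine ⟨by simpa using h0.1, ?_, ?_⟩
    · rcases h0.2 with h' | h' | ⟨j, hj, _⟩
      · simp only [List.getD_cons_zero] at h'; rw [h']; exact hp
      · simpa using h'
      · omega
    · refine ih _ (List.mem_cons_of_mem _ hp) ?_
      intro i hi
      have := h (i + 1) (by simpa using Nat.succ_lt_succ hi)
      simp only [List.getD_cons_succ] at this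
      refine ⟨this.1, ?_⟩
      rcases this.2 with h' | h' | ⟨j, hj, hje⟩
      · exact Or.inl h'
      · exact Or.inr (Or.inl (List.mem_cons_of_mem _ h'))
      · cases j with
        | zero =>
          simp only [List.getD_cons_zero] at hje
          exact Or.inr (Or.inl (by rw [← hje]; exact List.mem_cons_self))
        | succ j' =>
          simp only [List.getD_cons_succ] at hje
          exact Or.inr (Or.inr ⟨j', by omega, hje⟩)

-- pass 2 appends one depth per parent entry
lemma len_phase2 : ∀ (ps : List Int) (ds : List Int) (b : Int),
    ((ps.foldl stepB2 (ds, b)).1).length = ds.length + ps.length := by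
  intro ps
  induction ps with
  | nil => intro ds b; simp
  | cons p ps ih =>
    intro ds b
    simp only [List.foldl_cons, stepB2]
    rw [ih]
    simp
    omega

lemma valOf_append (D : List Int) (d v : Int) (h1 : -1 ≤ v) (h2 : v < (D.length : Int)) :
    valOf (D ++ [d]) v = valOf D v := by
  unfold valOf
  by_cases hv : v = -1
  · simp [hv]
  · have h0 : 0 ≤ v := by omega
    simp only [if_neg hv]
    lift v to ℕ using h0 with w
    rw [PySem.List.pyGet?_natCast, PySem.List.pyGet?_natCast,
      List.getElem?_append_left (by exact_mod_cast h2)]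

lemma valOf_append_self (D : List Int) (d : Int) : valOf (D ++ [d]) (D.length : Int) = d := by
  unfold valOf
  rw [if_neg (by omega), PySem.List.pyGet?_append_length]
  rfl

-- the main invariant-carrying induction
lemma main_lemma : ∀ (rc : List (List String)) (g last : PySem.Dict String Int)
    (parent : List Int) (m : Int),
    (∀ name, g.get? name = (last.get? name).map (valOf (parent.foldl stepB2 ([], 0)).1)) →
    (∀ name v, last.get? name = some v → -1 ≤ v ∧ v < (parent.length : Int)) →
    m = (parent.foldl stepB2 ([], 0)).2 →
    OkFrom rc last.keys →
    (rc.foldl stepA (g, m)).2 =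
      (((rc.foldl stepB1 (last, parent, (parent.length : Int))).2.1).foldl stepB2 ([], 0)).2 := by
  intro rc
  induction rc with
  | nil => intro g last parent m h1 h2 h3 _; simpa using h3
  | cons r rs ih =>
    intro g last parent m h1 h2 h3 hok
    obtain ⟨hr, hop, hoks⟩ := hok
    -- the op name is a key of last
    have hopget : ∃ p, last.get? (rcOp r) = some p := by
      cases hlast : last.get? (rcOp r) with
      | none => exact absurd ((PySem.Dict.get?_eq_none_iff_not_mem_keys last (rcOp r)).mp hlast) (by simpa using hop)
      | some p => exact ⟨p, rfl⟩
    obtain ⟨p, hp⟩ := hopget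
    have hpb := h2 _ _ hp
    -- name expressions in the ports reduce to rcOp / rcHead
    have hopName : PySem.Str.lower ((PySem.List.pyGet? r (-1)).getD "") = rcOp r := by
      rw [PySem.List.pyGet?_neg_one]; rfl
    have hheadName : PySem.Str.lower ((PySem.List.pyGet? r 0).getD "") = rcHead r := by
      rw [PySem.List.pyGet?_zero, ← List.head?_eq_getElem?]; rfl
    -- abbreviations for the old pass-2 result
    set D := (parent.foldl stepB2 ([], 0)).1 with hD
    have hDlen : (D.length : Int) = (parent.length : Int) := by
      rw [hD, len_phase2]; simp
    -- the new depth appended equals A's height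
    have hheight : (g.get? (rcOp r)).getD 0 + 1 = (if p = -1 then 2 else (PySem.List.pyGet? D p).getD 0 + 1) := by
      rw [h1, hp]
      unfold valOf
      by_cases hpe : p = -1 <;> simp [hpe]
    -- unfold one step of both folds
    simp only [List.foldl_cons]
    have hstepA : stepA (g, m) r =
        (g.insert (rcHead r) ((g.get? (rcOp r)).getD 0 + 1),
         max ((g.get? (rcOp r)).getD 0 + 1) m) := by
      simp only [stepA, hopName, hheadName]
    have hstepB : stepB1 (last, parent, (parent.length : Int)) r =
        (last.insert (rcHead r) (parent.length : Int), parent ++ [p], (parent.length : Int) + 1) := by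
      simp only [stepB1, hopName, hheadName, hp]; rfl
    rw [hstepA, hstepB]
    -- new pass-2 state
    have hph2 : (parent ++ [p]).foldl stepB2 ([], 0) =
        (D ++ [(g.get? (rcOp r)).getD 0 + 1],
         max (parent.foldl stepB2 ([], 0)).2 ((g.get? (rcOp r)).getD 0 + 1)) := by
      rw [List.foldl_append]
      simp only [List.foldl_cons, List.foldl_nil, stepB2, hheight, ← hD]
    have hcast : ((parent.length : Int) + 1) = (((parent ++ [p]).length : Int)) := by
      simp
    rw [hcast]
    -- apply the induction hypothesis at the new state
    apply ih
    · -- invariant (1)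
      intro name
      rw [hph2]
      by_cases hname : name = rcHead r
      · subst hname
        rw [PySem.Dict.get?_insert_self, PySem.Dict.get?_insert_self]
        simp only [Option.map_some]
        congr 1
        rw [← hDlen, valOf_append_self]
      · rw [PySem.Dict.get?_insert_of_ne _ _ hname, PySem.Dict.get?_insert_of_ne _ _ hname, h1]
        cases hgn : last.get? name with
        | none => simp
        | some v =>
          have hvb := h2 _ _ hgn
          simp only [Option.map_some]
          congr 1
          exact (valOf_append D _ v hvb.1 (by omega)).symm
    · -- invariant (2)
      intro name v hv
      by_cases hname : name = rcHead r
      · subst hname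
        rw [PySem.Dict.get?_insert_self] at hv
        injection hv with hv
        subst hv
        refine ⟨by omega, ?_⟩
        simp only [List.length_append, List.length_cons, List.length_nil]
        push_cast
        omega
      · rw [PySem.Dict.get?_insert_of_ne _ _ hname] at hv
        have := h2 _ _ hv
        refine ⟨this.1, ?_⟩
        have hvlt : v < (parent.length : Int) := this.2
        simp only [List.length_append, List.length_cons, List.length_nil]
        push_cast
        omega
    · -- max accumulator matches pass 2's best
      rw [hph2, h3]
      exact max_comm _ _
    · -- the key-availability condition survives the insert
      refine okFrom_mono _ _ _ ?_ hoks
      intro s hs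
      rw [PySem.Dict.mem_keys_insert]
      rcases List.mem_cons.mp hs with h | h
      · exact Or.inl h
      · exact Or.inr h

-- ===== VERDICT (by name: the statement is the Claim_ definition above) =====
theorem solve_spec : Claim_equal_solve := by
  intro n rc _ hpre
  unfold Spec_solve solve solve_alt
  have hkeys : ((PySem.Dict.empty : PySem.Dict String Int).insert "polycarp" (-1)).keys = ["polycarp"] := by decide
  have h := main_lemma rc
    ((PySem.Dict.empty : PySem.Dict String Int).insert "polycarp" 1)
    ((PySem.Dict.empty : PySem.Dict String Int).insert "polycarp" (-1))
    [] 0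
    (by
      intro name
      by_cases hname : name = "polycarp"
      · subst hname; rw [PySem.Dict.get?_insert_self, PySem.Dict.get?_insert_self]; rfl
      · rw [PySem.Dict.get?_insert_of_ne _ _ hname, PySem.Dict.get?_insert_of_ne _ _ hname]
        simp [PySem.Dict.get?_empty])
    (by
      intro name v hv
      by_cases hname : name = "polycarp"
      · subst hname; rw [PySem.Dict.get?_insert_self] at hv; injection hv with hv; subst hv; constructor <;> simp
      · rw [PySem.Dict.get?_insert_of_ne _ _ hname, PySem.Dict.get?_empty] at hv; cases hv)
    rfl
    (by
      rw [hkeys]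
      apply pre_to_ok
      · simp
      · intro i hi
        have := hpre i hi
        refine ⟨this.1, ?_⟩
        rcases this.2 with h | h
        · exact Or.inl h
        · exact Or.inr (Or.inr h))
  simpa using h
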